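-- pv_equiv track=rewrite | github.com/idrc-Battlecode-2021/Battlecode2022 | run_matches.py | parse_winner
-- ===== SOURCE A (Python) =====
-- def parse_winner(str, p1, p2):
--     ls = str.splitlines()
--     returnStr = "";
--     roundNum = "";
--     for line in ls[-20:]: # save some looping time
--         if "wins" in line:
--             returnStr = "str"
--             if len(p2) > len(p1):
--                 if p2 in line:
--                     returnStr = p2
--                 else:
--                     returnStr = p1
--             else:
--                 if p1 in line:
--                     returnStr = p1
--                 else:
--                     returnStr = p2
--             roundNum = line.split(" ")[-1][:-1]
--         elif "Reason" in line:
--             return (returnStr,roundNum,line)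
-- ===== SOURCE B (Python) =====
-- def parse_winner(str, p1, p2):
--     tail = str.splitlines()[-20:]
--     reason_idx = None
--     for i, line in enumerate(tail):
--         if "Reason" in line and "wins" not in line:
--             reason_idx = i
--             break
--     if reason_idx is None:
--         return None
--     reason = tail[reason_idx]
--     for line in reversed(tail[:reason_idx]):
--         if "wins" in line:
--             if len(p2) > len(p1):
--                 winner = p2 if p2 in line else p1
--             else:
--                 winner = p1 if p1 in line else p2
--             return (winner, line.split(" ")[-1][:-1], reason)
--     return ("", "", reason)
-- ===== Notes on version B (the rewrite author's own statement) =====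
-- stated objective: alternative
-- what changed: Instead of A's single forward pass threading winner/round state through every line, B first locates the first Reason line (one with 'Reason' but not 'wins'), then scans backward from it for the most recent wins line; the state-carrying fold disappears.
import Mathlib
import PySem

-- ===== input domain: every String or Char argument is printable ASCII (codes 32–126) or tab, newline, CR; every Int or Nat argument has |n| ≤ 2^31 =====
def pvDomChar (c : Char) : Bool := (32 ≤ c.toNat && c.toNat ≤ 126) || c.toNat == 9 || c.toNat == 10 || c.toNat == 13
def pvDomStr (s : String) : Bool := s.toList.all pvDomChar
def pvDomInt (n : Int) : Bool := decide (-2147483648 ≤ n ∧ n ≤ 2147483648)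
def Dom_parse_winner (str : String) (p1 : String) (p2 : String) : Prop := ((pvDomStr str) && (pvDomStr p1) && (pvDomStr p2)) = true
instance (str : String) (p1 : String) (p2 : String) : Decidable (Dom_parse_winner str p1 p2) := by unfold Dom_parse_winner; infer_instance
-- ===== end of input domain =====

-- B replaces A's state-threading forward fold by: find the first Reason line, then scan
-- backward from it for the latest wins line (alternative decomposition, same cost).

-- shared by both sources verbatim: the winner choice of a wins line
def pwWinner (p1 p2 line : String) : String :=
  if PySem.Str.len p2 > PySem.Str.len p1 then
    (if PySem.Str.isIn p2 line then p2 else p1)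
  else
    (if PySem.Str.isIn p1 line then p1 else p2)

-- line.split(" ")[-1][:-1] (split? with a nonempty sep is always `some` of a nonempty list,
-- so neither default is ever read)
def pwRound (line : String) : String :=
  PySem.Str.slice (PySem.List.pyGetD ((PySem.Str.split? line " ").getD []) (-1) "") none (some (-1))

-- ===== PORT A =====
def pwLoopA (p1 p2 : String) : List String → String → String → Option (String × String × String)
  | [], _, _ => none
  | l :: ls, rs, rn =>
    if PySem.Str.isIn "wins" l then
      pwLoopA p1 p2 ls (pwWinner p1 p2 l) (pwRound l)
    else if PySem.Str.isIn "Reason" l then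
      some (rs, rn, l)
    else
      pwLoopA p1 p2 ls rs rn

def parse_winner (str : String) (p1 : String) (p2 : String) : Option (String × String × String) :=
  pwLoopA p1 p2 (PySem.List.slice (PySem.Str.splitlines str) (some (-20)) none) "" ""

-- ===== PORT B =====
-- first index (enumerate-style) of a line with "Reason" and without "wins"
def pwFindReason : List String → Nat → Option Nat
  | [], _ => none
  | l :: ls, i =>
    if PySem.Str.isIn "Reason" l && !PySem.Str.isIn "wins" l then some i
    else pwFindReason ls (i + 1)

-- backward scan (the caller passes the reversed prefix): first wins line gives the pair
def pwFindWins (p1 p2 : String) : List String → Option (String × String)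
  | [] => none
  | l :: ls =>
    if PySem.Str.isIn "wins" l then some (pwWinner p1 p2 l, pwRound l)
    else pwFindWins p1 p2 ls

def parse_winner_alt (str : String) (p1 : String) (p2 : String) : Option (String × String × String) :=
  let tail := PySem.List.slice (PySem.Str.splitlines str) (some (-20)) none
  match pwFindReason tail 0 with
  | none => none
  | some r =>
    let reason := PySem.List.pyGetD tail (r : Int) ""
    match pwFindWins p1 p2 (PySem.List.slice tail none (some (r : Int))).reverse with
    | some (w, rd) => some (w, rd, reason)
    | none => some ("", "", reason)

-- ===== PRECONDITION & SPEC =====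
def Spec_parse_winner (str : String) (p1 : String) (p2 : String) (out : Option (String × String × String)) : Prop := out = parse_winner_alt str p1 p2
instance (str : String) (p1 : String) (p2 : String) (out : Option (String × String × String)) : Decidable (Spec_parse_winner str p1 p2 out) := by unfold Spec_parse_winner; infer_instance

-- ===== CLAIM (what is proved, stated in full; the proofs are below) =====
def Claim_equal_parse_winner : Prop := ∀ (str : String) (p1 : String) (p2 : String), Dom_parse_winner str p1 p2 → Spec_parse_winner str p1 p2 (parse_winner str p1 p2)

-- ===== LEMMAS AND PROOFS =====

-- proof-side restatement of B's core with an explicit fallback pair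
def pwB (p1 p2 : String) (ls : List String) (rs rn : String) : Option (String × String × String) :=
  match pwFindReason ls 0 with
  | none => none
  | some r =>
    match pwFindWins p1 p2 (ls.take r).reverse with
    | some (w, rd) => some (w, rd, ls[r]?.getD "")
    | none => some (rs, rn, ls[r]?.getD "")

theorem pwFindReason_succ (ls : List String) (i : Nat) :
    pwFindReason ls (i + 1) = (pwFindReason ls i).map (· + 1) := by
  induction ls generalizing i with
  | nil => simp [pwFindReason]
  | cons l ls ih =>
    simp only [pwFindReason]
    cases h : (PySem.Str.isIn "Reason" l && !PySem.Str.isIn "wins" l) with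
    | true => simp
    | false => simp [ih]

theorem pwFindWins_append (p1 p2 : String) (xs ys : List String) :
    pwFindWins p1 p2 (xs ++ ys) =
      match pwFindWins p1 p2 xs with
      | some v => some v
      | none => pwFindWins p1 p2 ys := by
  induction xs with
  | nil => simp [pwFindWins]
  | cons x xs ih =>
    simp only [List.cons_append, pwFindWins]
    cases h : PySem.Str.isIn "wins" x <;> simp [ih]

theorem pwLoopA_eq_pwB (p1 p2 : String) (ls : List String) (rs rn : String) :
    pwLoopA p1 p2 ls rs rn = pwB p1 p2 ls rs rn := by
  induction ls generalizing rs rn with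
  | nil => simp [pwLoopA, pwB, pwFindReason]
  | cons l ls ih =>
    simp only [pwLoopA, pwB, pwFindReason]
    cases hw : PySem.Str.isIn "wins" l with
    | true =>
      rw [if_pos rfl, ih, show (PySem.Str.isIn "Reason" l && !true) = false by simp,
          if_neg (by simp), pwFindReason_succ]
      unfold pwB
      cases hr : pwFindReason ls 0 with
      | none => simp
      | some r =>
        simp only [Option.map_some]
        rw [show (l :: ls).take (r + 1) = l :: ls.take r from rfl,
            show (l :: ls.take r).reverse = (ls.take r).reverse ++ [l] by simp,
            pwFindWins_append,
            show pwFindWins p1 p2 [l] = some (pwWinner p1 p2 l, pwRound l) by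
              simp only [pwFindWins, hw]; rfl]
        cases pwFindWins p1 p2 (ls.take r).reverse with
        | none => simp
        | some v => simp
    | false =>
      cases hR : PySem.Str.isIn "Reason" l with
      | true =>
        simp [pwFindWins]
      | false =>
        rw [if_neg (by simp), if_neg (by simp), ih,
            show (false && !false) = false by simp, if_neg (by simp), pwFindReason_succ]
        unfold pwB
        cases hr : pwFindReason ls 0 with
        | none => simp
        | some r =>
          simp only [Option.map_some]
          rw [show (l :: ls).take (r + 1) = l :: ls.take r from rfl,
              show (l :: ls.take r).reverse = (ls.take r).reverse ++ [l] by simp,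
              pwFindWins_append,
              show pwFindWins p1 p2 [l] = none by simp only [pwFindWins, hw]; rfl]
          cases pwFindWins p1 p2 (ls.take r).reverse with
          | none => simp
          | some v => simp

theorem alt_eq_pwB (str p1 p2 : String) :
    parse_winner_alt str p1 p2 =
      pwB p1 p2 (PySem.List.slice (PySem.Str.splitlines str) (some (-20)) none) "" "" := by
  unfold parse_winner_alt pwB
  cases hfr : pwFindReason (PySem.List.slice (PySem.Str.splitlines str) (some (-20)) none) 0 with
  | none => simp [hfr]
  | some r => simp [hfr, PySem.List.slice_to_natCast]

-- ===== VERDICT (by name: the statement is the Claim_ definition above) =====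
theorem parse_winner_spec : Claim_equal_parse_winner := by
  intro str p1 p2 _
  unfold Spec_parse_winner parse_winner
  rw [alt_eq_pwB, pwLoopA_eq_pwB]
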